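-- pv_equiv track=rewrite | github.com/AnshikaRana/codereview-nlp | modules/comment_quality.py | _extract_comment_code_pairs
-- ===== SOURCE A (Python) =====
-- def _extract_comment_code_pairs(code: str) -> list:
--     pairs = []
--     lines = code.splitlines()
--
--     for i, line in enumerate(lines):
--         stripped = line.strip()
--
--         if '#' not in stripped:
--             continue
--
--         # Full line comment
--         if stripped.startswith('#'):
--             comment_text = stripped.lstrip('#').strip()
--             next_code = ""
--
--             for j in range(i + 1, min(i + 4, len(lines))):
--                 candidate = lines[j].strip()
--                 if candidate and not candidate.startswith('#'):
--                     next_code = candidate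
--                     break
--
--             pairs.append((comment_text, next_code))
--
--         # Inline comment
--         else:
--             code_part, _, comment_part = line.partition('#')
--             comment_text = comment_part.strip()
--             code_context = code_part.strip()
--
--             if comment_text:
--                 pairs.append((comment_text, code_context))
--
--     return pairs
-- ===== SOURCE B (Python) =====
-- def _extract_comment_code_pairs(code: str) -> list:
--     lines = code.splitlines()
--     # Backward pass: suffix table; nxt[k] = (d, text) where line k+d is the
--     # nearest non-empty, non-comment line at or after index k, else None.
--     nxt = [None]
--     for line in reversed(lines):
--         s = line.strip()
--         if s and not s.startswith('#'):
--             nxt.append((0, s))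
--         else:
--             prev = nxt[-1]
--             nxt.append(prev if prev is None else (prev[0] + 1, prev[1]))
--     nxt.reverse()
--     pairs = []
--     # Forward pass: each line paired with the suffix entry for the NEXT index.
--     for line, hit in zip(lines, nxt[1:]):
--         stripped = line.strip()
--         if '#' not in stripped:
--             continue
--         if stripped.startswith('#'):
--             next_code = hit[1] if hit is not None and hit[0] <= 2 else ""
--             pairs.append((stripped.lstrip('#').strip(), next_code))
--         else:
--             code_part, _, comment_part = line.partition('#')
--             comment_text = comment_part.strip()
--             if comment_text:
--                 pairs.append((comment_text, code_part.strip()))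
--     return pairs
-- ===== Notes on version B (the rewrite author's own statement) =====
-- stated objective: alternative
-- what changed: Replaces the bounded forward re-scan after each full-line comment by a backward pass building a suffix table of nearest-code entries (distance, stripped text), then a single forward pass over zip(lines, table[1:]) that answers each comment by one table lookup (distance <= 2).
import Mathlib
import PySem

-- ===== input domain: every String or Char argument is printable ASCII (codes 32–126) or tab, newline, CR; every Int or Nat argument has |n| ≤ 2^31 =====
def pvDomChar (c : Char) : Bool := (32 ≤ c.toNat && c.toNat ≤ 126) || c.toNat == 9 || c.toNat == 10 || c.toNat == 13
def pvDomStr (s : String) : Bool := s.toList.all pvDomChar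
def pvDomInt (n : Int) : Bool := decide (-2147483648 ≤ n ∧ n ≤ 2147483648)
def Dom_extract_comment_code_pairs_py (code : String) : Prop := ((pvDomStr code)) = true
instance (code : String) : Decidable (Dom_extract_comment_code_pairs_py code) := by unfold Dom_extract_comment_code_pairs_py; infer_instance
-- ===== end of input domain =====

-- B replaces A's bounded forward re-scan after each full-line comment by a backward
-- suffix table of nearest-code entries consumed through a zip (objective: alternative).

-- shared primitive ports (the same Python built-ins appear in A and in B):
-- s.lstrip('#') — exact: drops exactly the leading '#' characters
def pvLstripHash (s : String) : String := String.ofList (s.toList.dropWhile (· == '#'))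

-- line.partition('#') without the middle component — exact when '#' occurs in line
-- (both programs only call it on such lines); code part, then part after the first '#'
def pvPartitionHash (s : String) : String × String :=
  (String.ofList (s.toList.takeWhile (· ≠ '#')), String.ofList ((s.toList.dropWhile (· ≠ '#')).drop 1))

-- Python's 'candidate and not candidate.startswith("#")' (used by both programs)
def pvIsCode (s : String) : Bool := !(s == "") && !(PySem.Str.startswith s "#")

-- ===== PORT A =====
-- inner 'for j in range(i+1, min(i+4, len(lines)))' with break
def pvScanA (lines : List String) : List Int → String
  | [] => ""
  | j :: js =>
    let candidate := PySem.Str.strip (PySem.List.pyGetD lines j "")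
    if pvIsCode candidate then candidate else pvScanA lines js

def pvLoopA (lines : List String) : Nat → List String → List (String × String)
  | _, [] => []
  | i, line :: rest =>
    let stripped := PySem.Str.strip line
    if PySem.Str.isIn "#" stripped then
      if PySem.Str.startswith stripped "#" then
        let comment_text := PySem.Str.strip (pvLstripHash stripped)
        let next_code := pvScanA lines
          (PySem.List.pyRange ((i : Int) + 1) (min ((i : Int) + 4) (lines.length : Int)))
        (comment_text, next_code) :: pvLoopA lines (i + 1) rest
      else
        let cp := pvPartitionHash line
        let comment_text := PySem.Str.strip cp.2
        let code_context := PySem.Str.strip cp.1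
        if comment_text == "" then pvLoopA lines (i + 1) rest
        else (comment_text, code_context) :: pvLoopA lines (i + 1) rest
    else pvLoopA lines (i + 1) rest

def extract_comment_code_pairs_py (code : String) : List (String × String) :=
  let lines := PySem.Str.splitlines code
  pvLoopA lines 0 lines

-- ===== PORT B =====
-- backward pass: suffix table; entry (d, text) = nearest code line is d further on
def pvNxtB : List String → List (Option (Nat × String))
  | [] => [none]
  | line :: rest =>
    let t := pvNxtB rest
    let s := PySem.Str.strip line
    (if pvIsCode s then some (0, s)
     else match t.head? with
          | some (some p) => some (p.1 + 1, p.2)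
          | _ => none) :: t

-- forward pass over zip(lines, nxt[1:])
def pvLoopB : List (String × Option (Nat × String)) → List (String × String)
  | [] => []
  | (line, hit) :: rest =>
    let stripped := PySem.Str.strip line
    if PySem.Str.isIn "#" stripped then
      if PySem.Str.startswith stripped "#" then
        let next_code := match hit with
          | some p => if p.1 ≤ 2 then p.2 else ""
          | none => ""
        (PySem.Str.strip (pvLstripHash stripped), next_code) :: pvLoopB rest
      else
        let cp := pvPartitionHash line
        if PySem.Str.strip cp.2 == "" then pvLoopB rest
        else (PySem.Str.strip cp.2, PySem.Str.strip cp.1) :: pvLoopB rest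
    else pvLoopB rest

def extract_comment_code_pairs_py_alt (code : String) : List (String × String) :=
  let lines := PySem.Str.splitlines code
  pvLoopB (lines.zip (pvNxtB lines).tail)

-- ===== PRECONDITION & SPEC =====
def Spec_extract_comment_code_pairs_py (code : String) (out : List (String × String)) : Prop := out = extract_comment_code_pairs_py_alt code
instance (code : String) (out : List (String × String)) : Decidable (Spec_extract_comment_code_pairs_py code out) := by unfold Spec_extract_comment_code_pairs_py; infer_instance

-- ===== CLAIM (what is proved, stated in full; the proofs are below) =====
def Claim_equal_extract_comment_code_pairs_py : Prop := ∀ (code : String), Dom_extract_comment_code_pairs_py code → Spec_extract_comment_code_pairs_py code (extract_comment_code_pairs_py code)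

-- ===== LEMMAS AND PROOFS =====

-- spec of the suffix table: nearest code line of a list of lines
def pvFirstCode : List String → Option (Nat × String)
  | [] => none
  | line :: rest =>
    let s := PySem.Str.strip line
    if pvIsCode s then some (0, s)
    else (pvFirstCode rest).map (fun p => (p.1 + 1, p.2))

theorem pvNxtB_head (ls : List String) : (pvNxtB ls).head? = some (pvFirstCode ls) := by
  cases ls with
  | nil => simp [pvNxtB, pvFirstCode]
  | cons line rest =>
    simp only [pvNxtB, pvFirstCode, pvNxtB_head rest, List.head?_cons]
    cases h : pvFirstCode rest <;> simp

theorem pvNxtB_cons (line : String) (rest : List String) :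
    pvNxtB (line :: rest) = pvFirstCode (line :: rest) :: pvNxtB rest := by
  simp only [pvNxtB, pvFirstCode, pvNxtB_head rest]
  cases h : pvFirstCode rest <;> simp

theorem pvFirstCode_take (ls : List String) : ∀ (k : Nat),
    pvFirstCode (List.take k ls) =
      match pvFirstCode ls with
      | some p => if p.1 < k then some p else none
      | none => none := by
  induction ls with
  | nil => intro k; simp [pvFirstCode]
  | cons line rest ih =>
    intro k
    cases k with
    | zero =>
      simp only [List.take_zero, pvFirstCode]
      cases h : pvFirstCode rest <;> simp <;> split <;> simp
    | succ k =>
      simp only [List.take_succ_cons, pvFirstCode, ih k]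
      by_cases hc : pvIsCode (PySem.Str.strip line)
      · simp [hc]
      · simp only [hc, Bool.false_eq_true, if_false]
        cases h : pvFirstCode rest with
        | none => simp
        | some p =>
          simp only [Option.map_some]
          by_cases hk : p.1 < k <;> simp [hk]

theorem pvScanA_eq (lines : List String) : ∀ (w a : Nat),
    pvScanA lines (PySem.List.pyRange (a : Int) (min ((a : Int) + w) (lines.length : Int))) =
      (match pvFirstCode (List.take w (List.drop a lines)) with
       | some p => p.2
       | none => "") := by
  intro w
  induction w with
  | zero =>
    intro a
    rw [PySem.List.pyRange_one_eq_nil (by push_cast; omega)]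
    simp [pvScanA, pvFirstCode]
  | succ w ih =>
    intro a
    by_cases ha : a < lines.length
    · rw [PySem.List.pyRange_one_cons (by push_cast; omega)]
      rw [List.drop_eq_getElem_cons ha]
      simp only [pvScanA, List.take_succ_cons, pvFirstCode]
      have hget : PySem.List.pyGetD lines (a : Int) "" = lines[a] := by
        rw [PySem.List.pyGetD_natCast, List.getD_eq_getElem?_getD]
        simp [ha]
      rw [hget]
      by_cases hc : pvIsCode (PySem.Str.strip lines[a])
      · simp [hc]
      · have hb : (a : Int) + ((w + 1 : Nat) : Int) = ((a + 1 : Nat) : Int) + (w : Int) := by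
          push_cast; ring
        rw [hb]
        have h1 := ih (a + 1)
        have hcast : ((a + 1 : Nat) : Int) = (a : Int) + 1 := by push_cast; ring
        rw [hcast] at h1
        simp only [hc, Bool.false_eq_true, if_false]
        rw [hcast, h1]
        cases h : pvFirstCode (List.take w (List.drop (a + 1) lines)) <;> simp
    · rw [PySem.List.pyRange_one_eq_nil (by push_cast; omega)]
      rw [List.drop_eq_nil_of_le (by omega)]
      simp [pvScanA, pvFirstCode]

theorem pvMain (lines : List String) : ∀ (ls : List String) (i : Nat),
    ls = List.drop i lines →
    pvLoopA lines i ls = pvLoopB (ls.zip (pvNxtB ls).tail) := by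
  intro ls
  induction ls with
  | nil => intro i _; simp [pvLoopA, pvLoopB]
  | cons line rest ih =>
    intro i hdrop
    have hrest : rest = List.drop (i + 1) lines := by
      rw [← List.tail_drop, ← hdrop]; rfl
    have hlen : i < lines.length := by
      by_contra h
      have : List.drop i lines = [] := List.drop_eq_nil_of_le (by omega)
      rw [this] at hdrop; exact absurd hdrop (by simp)
    have hscan : pvScanA lines
        (PySem.List.pyRange ((i : Int) + 1) (min ((i : Int) + 4) (lines.length : Int))) =
        (match pvFirstCode rest with
         | some p => if p.1 ≤ 2 then p.2 else ""
         | none => "") := by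
      have h1 := pvScanA_eq lines 3 (i + 1)
      have hcast2 : ((i + 1 : Nat) : Int) + ((3 : Nat) : Int) = (i : Int) + 4 := by push_cast; ring
      have hcast : ((i + 1 : Nat) : Int) = (i : Int) + 1 := by push_cast; ring
      rw [hcast2, hcast] at h1
      rw [h1, ← hrest, pvFirstCode_take]
      cases h : pvFirstCode rest with
      | none => simp
      | some p =>
        by_cases hp : p.1 ≤ 2
        · simp [show p.1 < 3 by omega, hp]
        · simp [show ¬ p.1 < 3 by omega, hp]
    have hx : pvNxtB rest = pvFirstCode rest :: (pvNxtB rest).tail := by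
      cases rest with
      | nil => simp [pvNxtB, pvFirstCode]
      | cons a l => rw [pvNxtB_cons]; rfl
    rw [pvNxtB_cons]
    simp only [List.tail_cons]
    conv_rhs => rw [hx]
    rw [List.zip_cons_cons]
    by_cases h1 : PySem.Str.isIn "#" (PySem.Str.strip line)
    · by_cases h2 : PySem.Str.startswith (PySem.Str.strip line) "#"
      · simp only [pvLoopA, pvLoopB, h1, h2, if_true, hscan, ih (i + 1) hrest]
      · by_cases h3 : PySem.Str.strip (pvPartitionHash line).2 == ""
        · simp only [pvLoopA, pvLoopB, h1, h2, h3, Bool.false_eq_true, if_false, if_true,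
            ih (i + 1) hrest]
        · simp only [pvLoopA, pvLoopB, h1, h2, h3, Bool.false_eq_true, if_false, if_true,
            ih (i + 1) hrest]
    · simp only [pvLoopA, pvLoopB, h1, Bool.false_eq_true, if_false, ih (i + 1) hrest]

-- ===== VERDICT (by name: the statement is the Claim_ definition above) =====
theorem extract_comment_code_pairs_py_spec : Claim_equal_extract_comment_code_pairs_py := by
  intro code _
  unfold Spec_extract_comment_code_pairs_py extract_comment_code_pairs_py extract_comment_code_pairs_py_alt
  exact pvMain _ _ 0 rfl
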